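-- pv_equiv track=rewrite | github.com/jonasrenault/advent2020 | advent2020/day24.py | flip_blacks
-- ===== SOURCE A (Python) =====
-- from collections.abc import Iterator
--
-- def flip_blacks(blacks: set[tuple[int, int]]) -> set[tuple[int, int]]:
--     """
--     Return set of tiles to flip from black to white
--
--     Args:
--         blacks (set[tuple[int, int]]): current black tiles
--
--     Returns:
--         set[tuple[int, int]]: set of tiles to flip white
--     """
--     to_flip = set()
--     for tile in blacks:
--         tile_neighbors = set(neighbors(tile))
--         black_neighbors = tile_neighbors & blacks
--         if len(black_neighbors) == 0 or len(black_neighbors) > 2: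
--             to_flip.add(tile)
--     return to_flip
--
-- def neighbors(tile: tuple[int, int]) -> Iterator[tuple[int, int]]:
--     for dir in ("e", "ne", "nw", "w", "sw", "se"):
--         yield move_one(tile, dir)
--
-- def move_one(tile: tuple[int, int], dir: str) -> tuple[int, int]:
--     """
--     Return coordinates of neighbor tile in given direction
--
--     Args:
--         tile (tuple[int, int]): start tile
--         dir (str): direction
--
--     Returns:
--         tuple[int, int]: neighbor tile
--     """
--     x, y = tile
--     match dir:
--         case "e":
--             return (x + 2, y)
--         case "ne":
--             return (x + 1, y + 1)
--         case "nw":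
--             return (x - 1, y + 1)
--         case "w":
--             return (x - 2, y)
--         case "sw":
--             return (x - 1, y - 1)
--         case "se":
--             return (x + 1, y - 1)
-- ===== SOURCE B (Python) =====
-- def flip_blacks(blacks: set[tuple[int, int]]) -> set[tuple[int, int]]:
--     """
--     Return set of tiles to flip from black to white.
--
--     One pass builds a neighbor counter: every black tile increments the count
--     of each of its 6 neighbors; since the hex-neighbor relation is symmetric,
--     counts[t] is exactly t's number of black neighbors.  A second pass keeps
--     the black tiles whose count is 0 or greater than 2.
--     """
--     counts: dict[tuple[int, int], int] = {}
--     for (x, y) in blacks: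
--         for n in ((x + 2, y), (x + 1, y + 1), (x - 1, y + 1),
--                   (x - 2, y), (x - 1, y - 1), (x + 1, y - 1)):
--             counts[n] = counts.get(n, 0) + 1
--     return {t for t in blacks if counts.get(t, 0) == 0 or counts.get(t, 0) > 2}
-- ===== Notes on version B (the rewrite author's own statement) =====
-- stated objective: alternative
-- what changed: Instead of intersecting each tile's 6-neighbor set with the black set per tile, B builds one neighbor counter in a single pass (each black tile increments its 6 neighbors; the hex-neighbor relation is symmetric) and then selects black tiles whose count is 0 or >2 by dictionary lookup.
import Mathlib
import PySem

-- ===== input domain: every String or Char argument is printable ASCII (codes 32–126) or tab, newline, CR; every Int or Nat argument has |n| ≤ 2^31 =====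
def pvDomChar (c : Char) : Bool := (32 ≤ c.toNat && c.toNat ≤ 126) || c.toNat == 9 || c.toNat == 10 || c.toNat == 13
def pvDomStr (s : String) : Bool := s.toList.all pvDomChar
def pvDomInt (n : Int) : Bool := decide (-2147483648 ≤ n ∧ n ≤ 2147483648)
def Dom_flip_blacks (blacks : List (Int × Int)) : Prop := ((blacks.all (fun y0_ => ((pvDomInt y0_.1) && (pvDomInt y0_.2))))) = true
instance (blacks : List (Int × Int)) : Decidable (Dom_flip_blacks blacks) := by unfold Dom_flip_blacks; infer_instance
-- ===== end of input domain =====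

-- B replaces A's per-tile set-intersection with a single neighbor counter built in one pass
-- (symmetry of the hex-neighbor relation), then a lookup pass ('alternative' decomposition).


-- ===== PORT A =====
def move_one (tile : Int × Int) (dir : String) : Int × Int :=
  match dir with
  | "e"  => (tile.1 + 2, tile.2)
  | "ne" => (tile.1 + 1, tile.2 + 1)
  | "nw" => (tile.1 - 1, tile.2 + 1)
  | "w"  => (tile.1 - 2, tile.2)
  | "sw" => (tile.1 - 1, tile.2 - 1)
  | "se" => (tile.1 + 1, tile.2 - 1)
  | _    => tile  -- unreachable: Python returns None here, but 'neighbors' only passes the six directions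

def neighbors (tile : Int × Int) : List (Int × Int) :=
  (["e", "ne", "nw", "w", "sw", "se"] : List String).map (move_one tile)

def flip_blacks (blacks : List (Int × Int)) : List (Int × Int) :=
  blacks.foldl (fun to_flip tile =>
    let tile_neighbors := PySem.Set.ofList (neighbors tile)
    let black_neighbors := PySem.Set.inter tile_neighbors blacks
    if PySem.Set.len black_neighbors == 0 || PySem.Set.len black_neighbors > 2 then
      PySem.Set.add to_flip tile
    else to_flip) PySem.Set.empty

-- ===== PORT B =====
def nbrsB (t : Int × Int) : List (Int × Int) :=
  [(t.1 + 2, t.2), (t.1 + 1, t.2 + 1), (t.1 - 1, t.2 + 1),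
   (t.1 - 2, t.2), (t.1 - 1, t.2 - 1), (t.1 + 1, t.2 - 1)]

def flip_blacks_alt (blacks : List (Int × Int)) : List (Int × Int) :=
  let counts : PySem.Dict (Int × Int) Int :=
    blacks.foldl (fun d t => (nbrsB t).foldl (fun d n => d.insert n (d.getD n 0 + 1)) d) PySem.Dict.empty
  blacks.foldl (fun acc t =>
    if counts.getD t 0 == 0 || counts.getD t 0 > 2 then PySem.Set.add acc t else acc) PySem.Set.empty

-- ===== PRECONDITION & SPEC =====
-- Pre_: the Python parameter is a set, so its List port holds distinct elements; this excludes
-- no input the Python function can receive.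
def Pre_flip_blacks (blacks : List (Int × Int)) : Prop := blacks.Nodup
instance (blacks : List (Int × Int)) : Decidable (Pre_flip_blacks blacks) := by unfold Pre_flip_blacks; infer_instance
def pvWitness_flip_blacks : (List (Int × Int)) := [(0, 0), (2, 0), (1, 1)]

def Spec_flip_blacks (blacks : List (Int × Int)) (out : List (Int × Int)) : Prop := out = flip_blacks_alt blacks
instance (blacks : List (Int × Int)) (out : List (Int × Int)) : Decidable (Spec_flip_blacks blacks out) := by unfold Spec_flip_blacks; infer_instance

-- ===== CLAIM (what is proved, stated in full; the proofs are below) =====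
def Claim_equal_flip_blacks : Prop := ∀ (blacks : List (Int × Int)), Dom_flip_blacks blacks → Pre_flip_blacks blacks → Spec_flip_blacks blacks (flip_blacks blacks)

-- ===== LEMMAS AND PROOFS =====

-- the six neighbor offsets are the same list in both ports
theorem neighbors_eq_nbrsB (t : Int × Int) : neighbors t = nbrsB t := by
  simp [neighbors, move_one, nbrsB]

theorem nodup_nbrsB (t : Int × Int) : (nbrsB t).Nodup := by
  simp [nbrsB, Prod.ext_iff]
  omega

-- symmetry of the hex-neighbor relation
theorem mem_nbrsB_symm (a b : Int × Int) : a ∈ nbrsB b ↔ b ∈ nbrsB a := by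
  simp [nbrsB, Prod.ext_iff]
  omega

-- |m ∩ l| counted from either side, both lists without duplicates
theorem countP_mem_swap {α : Type} [BEq α] [LawfulBEq α] (m l : List α)
    (hm : m.Nodup) (hl : l.Nodup) :
    m.countP (fun x => decide (x ∈ l)) = l.countP (fun x => decide (x ∈ m)) := by
  classical
  rw [List.countP_eq_length_filter, List.countP_eq_length_filter]
  rw [← List.toFinset_card_of_nodup (hm.filter _), ← List.toFinset_card_of_nodup (hl.filter _)]
  rw [List.toFinset_filter, List.toFinset_filter]
  congr 1
  have h1 : {x ∈ m.toFinset | decide (x ∈ l) = true} = m.toFinset ∩ l.toFinset := by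
    ext x; simp
  have h2 : {x ∈ l.toFinset | decide (x ∈ m) = true} = l.toFinset ∩ m.toFinset := by
    ext x; simp
  rw [h1, h2, Finset.inter_comm]

-- how many tiles of bl list t as a neighbor
theorem count_flatMap_nbrsB (t : Int × Int) (bl : List (Int × Int)) :
    (bl.flatMap nbrsB).count t = bl.countP (fun b => decide (t ∈ nbrsB b)) := by
  induction bl with
  | nil => simp
  | cons b bs ih =>
    rw [List.flatMap_cons, List.count_append, List.countP_cons, ih]
    by_cases h : t ∈ nbrsB b
    · rw [List.count_eq_one_of_mem (nodup_nbrsB b) h]; simp [h]; omega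
    · rw [List.count_eq_zero_of_not_mem h]; simp [h]

-- B's counter at a tile t = t's number of black neighbors = A's intersection size
theorem counter_eq_inter_len (blacks : List (Int × Int)) (hnd : blacks.Nodup) (t : Int × Int) :
    (blacks.foldl (fun d t => (nbrsB t).foldl (fun d n => d.insert n (d.getD n 0 + 1)) d)
        PySem.Dict.empty).getD t 0
      = ((PySem.Set.inter (PySem.Set.ofList (neighbors t)) blacks).length : Int) := by
  rw [← List.foldl_flatMap, PySem.Dict.getD_foldl_insert_add_one, PySem.Dict.getD_empty,
    count_flatMap_nbrsB]
  have h1 : blacks.countP (fun b => decide (t ∈ nbrsB b))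
      = blacks.countP (fun b => decide (b ∈ nbrsB t)) :=
    List.countP_congr (fun b _ => by simp [mem_nbrsB_symm t b])
  rw [h1, neighbors_eq_nbrsB, PySem.Set.ofList_eq_self_of_nodup _ (nodup_nbrsB t)]
  have h2 := countP_mem_swap (nbrsB t) blacks (nodup_nbrsB t) hnd
  simp [PySem.Set.inter, List.countP_eq_length_filter] at h2 ⊢
  exact h2.symm

theorem flip_blacks_spec : Claim_equal_flip_blacks := by
  intro blacks _ hnd
  unfold Spec_flip_blacks flip_blacks flip_blacks_alt
  apply PySem.List.foldl_congr_mem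
  intro acc t _
  simp only [PySem.Set.len, ← counter_eq_inter_len blacks hnd t]
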